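-- pv_equiv track=rewrite | github.com/nextgis/qgis_osminfo | src/osminfo/openstreetmap/preset_repository.py | _translation_candidates
-- ===== SOURCE A (Python) =====
-- from typing import Dict, Iterable, List, Optional, Tuple
--
-- def _translation_candidates(language: str) -> List[str]:
--     normalized_language = language.strip()
--     if len(normalized_language) == 0:
--         return []
--
--     candidates: List[str] = []
--     for candidate in (
--         normalized_language,
--         normalized_language.replace("-", "_"),
--         normalized_language.replace("_", "-"),
--     ):
--         if len(candidate) == 0 or candidate in candidates:
--             continue
--
--         candidates.append(candidate)
--
--     # Add short language code candidates for any locale with a region or variant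
--     for candidate in tuple(candidates):
--         short_language = candidate.split("_", 1)[0].split("-", 1)[0]
--         if len(short_language) == 0 or short_language in candidates:
--             continue
--
--         candidates.append(short_language)
--
--     return candidates
-- ===== SOURCE B (Python) =====
-- def _translation_candidates(language):
--     # Closed-form case analysis: with n the stripped input, the answer is n,
--     # then the '-'->'_' form iff n contains '-', then the '_'->'-' form iff n
--     # contains '_', then the prefix before the first separator iff that prefix
--     # is a proper nonempty prefix.  No dedup pass or membership test is needed.
--     n = language.strip()
--     if not n:
--         return []
--     out = [n]
--     if "-" in n:
--         out.append(n.replace("-", "_"))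
--     if "_" in n:
--         out.append(n.replace("_", "-"))
--     i = next((j for j, ch in enumerate(n) if ch in "-_"), len(n))
--     if 0 < i < len(n):
--         out.append(n[:i])
--     return out
-- ===== Notes on version B (the rewrite author's own statement) =====
-- stated objective: simpler
-- what changed: A builds the result with two membership-guarded append loops over generated candidates; B is a closed-form case analysis that emits n, each separator-swapped variant exactly when the other separator occurs in n, and the prefix before the first separator exactly when it is a proper nonempty prefix, so no dedup or membership test exists at all.
import Mathlib
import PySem

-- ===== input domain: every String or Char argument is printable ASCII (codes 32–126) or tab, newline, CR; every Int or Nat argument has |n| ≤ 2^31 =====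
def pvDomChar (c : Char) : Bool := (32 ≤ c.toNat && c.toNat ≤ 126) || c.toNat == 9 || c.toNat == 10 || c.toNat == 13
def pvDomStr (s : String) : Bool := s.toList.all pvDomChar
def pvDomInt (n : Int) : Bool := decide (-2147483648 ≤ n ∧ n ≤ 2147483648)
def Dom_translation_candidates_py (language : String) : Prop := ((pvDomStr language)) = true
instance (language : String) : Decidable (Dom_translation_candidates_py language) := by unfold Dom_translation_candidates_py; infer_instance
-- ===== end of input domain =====

-- B replaces A's two dedup-by-membership append loops with a closed-form case
-- analysis: emit n, then each separator-swapped form iff the other separator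
-- occurs in n, then the prefix before the first separator iff it is a proper
-- nonempty prefix (objective: simpler).

-- ===== PORT A =====
-- c.split("_", 1)[0].split("-", 1)[0]; split(sep, 1) always yields a nonempty list,
-- so the getD/headD defaults are never used.
def pyShort (c : String) : String :=
  let p1 := ((PySem.Str.splitMax? c "_" 1).getD [c]).headD c
  ((PySem.Str.splitMax? p1 "-" 1).getD [p1]).headD p1

def translation_candidates_py (language : String) : List String :=
  let n := PySem.Str.strip language
  if PySem.Str.len n = 0 then []
  else
    let c1 := [n, PySem.Str.replace n "-" "_", PySem.Str.replace n "_" "-"].foldl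
      (fun acc c => if PySem.Str.len c = 0 ∨ c ∈ acc then acc else acc ++ [c]) []
    c1.foldl (fun acc c =>
      if PySem.Str.len (pyShort c) = 0 ∨ pyShort c ∈ acc then acc
      else acc ++ [pyShort c]) c1

-- ===== PORT B =====
-- next((j for j, ch in enumerate(n) if ch in "-_"), len(n)): index of the first
-- '-' or '_' (length of n if there is none), as the obvious structural recursion.
def pvFirstSep : List Char → Nat
  | [] => 0
  | c :: rest => if c = '-' ∨ c = '_' then 0 else pvFirstSep rest + 1

def translation_candidates_py_alt (language : String) : List String :=
  let n := PySem.Str.strip language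
  if PySem.Str.len n = 0 then []
  else
    let out1 := [n]
    let out2 := if PySem.Str.isIn "-" n then out1 ++ [PySem.Str.replace n "-" "_"] else out1
    let out3 := if PySem.Str.isIn "_" n then out2 ++ [PySem.Str.replace n "_" "-"] else out2
    let i := pvFirstSep n.toList
    if 0 < i ∧ i < PySem.Str.len n then out3 ++ [PySem.Str.slice n none (some (i : Int))] else out3

-- ===== PRECONDITION & SPEC =====
def Spec_translation_candidates_py (language : String) (out : List String) : Prop := out = translation_candidates_py_alt language
instance (language : String) (out : List String) : Decidable (Spec_translation_candidates_py language out) := by unfold Spec_translation_candidates_py; infer_instance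

-- ===== CLAIM (what is proved, stated in full; the proofs are below) =====
def Claim_equal_translation_candidates_py : Prop := ∀ (language : String), Dom_translation_candidates_py language → Spec_translation_candidates_py language (translation_candidates_py language)

-- ===== LEMMAS AND PROOFS =====

def pvNonEmpty (c : String) : Bool := !(PySem.Str.len c == 0)

def pvNotSep (c : Char) : Bool := !(c == '-' || c == '_')

lemma add_of_mem {s : List String} {a : String} (h : a ∈ s) :
    PySem.Set.add s a = s := by
  simp [PySem.Set.add, PySem.Set.contains, h]

lemma add_of_not_mem {s : List String} {a : String} (h : a ∉ s) :
    PySem.Set.add s a = s ++ [a] := by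
  simp [PySem.Set.add, PySem.Set.contains, h]

lemma mem_update_right {s xs : List String} {a : String} (h : a ∈ xs) :
    a ∈ PySem.Set.update s xs := by
  rw [PySem.Set.update_eq_append_filter]
  by_cases hs : a ∈ s
  · exact List.mem_append_left _ hs
  · refine List.mem_append_right _ ?_
    refine List.mem_filter.mpr ⟨(PySem.Set.mem_ofList _ _).mpr h, ?_⟩
    simp [PySem.Set.contains, hs]

-- A's guarded append loop is: filter out empties, then Set.update.
lemma foldl_guard (f : String → String) : ∀ (l acc : List String),
    l.foldl (fun acc c => if PySem.Str.len (f c) = 0 ∨ f c ∈ acc then acc else acc ++ [f c]) acc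
      = PySem.Set.update acc ((l.map f).filter pvNonEmpty) := by
  intro l
  induction l with
  | nil => intro acc; simp [PySem.Set.update_nil]
  | cons c l ih =>
    intro acc
    simp only [List.foldl_cons, List.map_cons, List.filter_cons]
    by_cases h0 : f c = ""
    · have hpe : pvNonEmpty (f c) = false := by simp [pvNonEmpty, h0]
      have hcond : (PySem.Str.len (f c) = 0 ∨ f c ∈ acc) := Or.inl (by simp [h0])
      rw [if_pos hcond, hpe]
      simp only [Bool.false_eq_true, if_false]
      exact ih acc
    · have hp : pvNonEmpty (f c) = true := by simp [pvNonEmpty, h0]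
      rw [hp]
      simp only [if_true, PySem.Set.update_cons]
      by_cases hm : f c ∈ acc
      · have hcond : (PySem.Str.len (f c) = 0 ∨ f c ∈ acc) := Or.inr hm
        rw [if_pos hcond, add_of_mem hm, ih]
      · have hcond : ¬ (PySem.Str.len (f c) = 0 ∨ f c ∈ acc) := by
          simp [h0, hm]
        rw [if_neg hcond, add_of_not_mem hm, ih]

lemma foldl_guard_id : ∀ (l acc : List String),
    l.foldl (fun acc c => if PySem.Str.len c = 0 ∨ c ∈ acc then acc else acc ++ [c]) acc
      = PySem.Set.update acc (l.filter pvNonEmpty) := by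
  intro l acc
  have := foldl_guard id l acc
  simpa using this

-- Deduplicating the list first does not change the update by its (filtered) image.
lemma update_map_ofList (f : String → String) : ∀ (l s : List String),
    PySem.Set.update s (((PySem.Set.ofList l).map f).filter pvNonEmpty)
      = PySem.Set.update s ((l.map f).filter pvNonEmpty) := by
  intro l
  induction l using List.reverseRecOn with
  | nil => intro s; rfl
  | append_singleton l x ih =>
    intro s
    rw [PySem.Set.ofList_append_singleton]
    by_cases hx : x ∈ PySem.Set.ofList l
    · rw [add_of_mem hx, ih]
      rw [List.map_append, List.filter_append, PySem.Set.update_append]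
      by_cases hp : pvNonEmpty (f x) = true
      · have hfx : f x ∈ (l.map f).filter pvNonEmpty := by
          refine List.mem_filter.mpr ⟨?_, hp⟩
          exact List.mem_map_of_mem ((PySem.Set.mem_ofList _ _).mp hx)
        have hmem : f x ∈ PySem.Set.update s ((l.map f).filter pvNonEmpty) :=
          mem_update_right hfx
        simp [hp, PySem.Set.update_cons, PySem.Set.update_nil, add_of_mem hmem]
      · simp only [List.map_cons, List.map_nil, List.filter_cons]
        simp only [Bool.not_eq_true] at hp
        rw [hp]
        simp [PySem.Set.update_nil]
    · rw [add_of_not_mem hx, List.map_append, List.filter_append,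
        PySem.Set.update_append, ih, List.map_append, List.filter_append,
        PySem.Set.update_append]

-- pre-filtering the input does not change the filtered image (pyShort "" = "").
lemma filt_map_filt : ∀ (l : List String),
    ((l.filter pvNonEmpty).map pyShort).filter pvNonEmpty
      = (l.map pyShort).filter pvNonEmpty := by
  intro l
  induction l with
  | nil => rfl
  | cons c l ih =>
    by_cases hp : pvNonEmpty c = true
    · simp only [List.filter_cons, hp, if_true, List.map_cons, ih]
    · have hc : c = "" := by
        simp [pvNonEmpty] at hp
        exact hp
      subst hc
      have hshort : pyShort "" = "" := by decide
      have hpe : pvNonEmpty "" = false := by decide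
      simp only [List.filter_cons, List.map_cons, hshort, hpe, Bool.false_eq_true,
        if_false, ih]

-- replace with one-char old/new is a map over the characters
lemma replace_go_single (o w : Char) : ∀ (fuel : Nat) (l acc : List Char), l.length ≤ fuel →
    PySem.Chars.replace.go [o] [w] fuel l acc
      = acc.reverse ++ l.map (fun c => if c = o then w else c) := by
  intro fuel
  induction fuel with
  | zero =>
    intro l acc h
    have : l = [] := List.length_eq_zero_iff.mp (Nat.le_zero.mp h)
    subst this
    simp [PySem.Chars.replace.go]
  | succ f ih =>
    intro l acc h
    cases l with
    | nil => simp [PySem.Chars.replace.go]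
    | cons c t =>
      rw [PySem.Chars.replace.go]
      by_cases hc : c = o
      · have hpre : [o].isPrefixOf (c :: t) = true := by simp [List.isPrefixOf, hc]
        rw [if_pos hpre]
        have := ih t ([w].reverse ++ acc) (by simpa using Nat.lt_succ_iff.mp (by simpa using h))
        simpa [hc] using this
      · have hpre : ¬ ([o].isPrefixOf (c :: t) = true) := by
          simp [List.isPrefixOf]; exact fun hh => hc hh.symm
        rw [if_neg hpre]
        have := ih t (c :: acc) (by simpa using Nat.lt_succ_iff.mp (by simpa using h))
        simpa [hc] using this

lemma replace_single (cs : List Char) (o w : Char) :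
    PySem.Chars.replace cs [o] [w] = cs.map (fun c => if c = o then w else c) := by
  rw [PySem.Chars.replace]
  simp only [List.isEmpty_cons, Bool.false_eq_true, if_false]
  simpa using replace_go_single o w cs.length cs [] le_rfl

-- the head of split(sep, 1) for a one-char sep is takeWhile (· ≠ sep)
lemma splitOnMax_go_zero (o : Char) : ∀ (fuel : Nat) (t : List Char) (acc : List (List Char)),
    PySem.Chars.splitOnMax.go [o] fuel 0 t [] acc = acc.reverse ++ [t] := by
  intro fuel t acc
  cases fuel with
  | zero => simp [PySem.Chars.splitOnMax.go]
  | succ f =>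
    cases t with
    | nil => simp [PySem.Chars.splitOnMax.go]
    | cons c r => simp [PySem.Chars.splitOnMax.go]

lemma splitOnMax_go_one (o : Char) : ∀ (fuel : Nat) (l cur : List Char) (acc : List (List Char)),
    l.length ≤ fuel →
    ∃ rest, PySem.Chars.splitOnMax.go [o] fuel 1 l cur acc
      = acc.reverse ++ ((cur.reverse ++ l.takeWhile (fun c => !(c == o))) :: rest) := by
  intro fuel
  induction fuel with
  | zero =>
    intro l cur acc h
    have : l = [] := List.length_eq_zero_iff.mp (Nat.le_zero.mp h)
    subst this
    exact ⟨[], by simp [PySem.Chars.splitOnMax.go]⟩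
  | succ f ih =>
    intro l cur acc h
    cases l with
    | nil => exact ⟨[], by simp [PySem.Chars.splitOnMax.go]⟩
    | cons c t =>
      rw [PySem.Chars.splitOnMax.go]
      by_cases hc : c = o
      · have hpre : [o].isPrefixOf (c :: t) = true := by simp [List.isPrefixOf, hc]
        simp only [if_neg (by omega : ¬ (1 = 0)), hpre, if_true]
        refine ⟨[t], ?_⟩
        have hz := splitOnMax_go_zero o f t (cur.reverse :: acc)
        simp only [show (1:Nat) - 1 = 0 from rfl, List.length_cons, List.length_nil,
          List.drop_succ_cons, List.drop_zero] at *
        rw [hz]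
        simp [hc]
      · have hpre : ¬ ([o].isPrefixOf (c :: t) = true) := by
          simp [List.isPrefixOf]; exact fun hh => hc hh.symm
        simp only [if_neg (by omega : ¬ (1 = 0)), if_neg hpre]
        obtain ⟨rest, hr⟩ := ih t (c :: cur) acc (by simpa using Nat.lt_succ_iff.mp (by simpa using h))
        refine ⟨rest, ?_⟩
        rw [hr]
        simp [hc]

lemma split1_head (s : String) (o : Char) (os : String) (ho : os.toList = [o]) :
    ((PySem.Str.splitMax? s os 1).getD [s]).headD s
      = String.ofList (s.toList.takeWhile (fun c => !(c == o))) := by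
  obtain ⟨rest, hr⟩ := splitOnMax_go_one o (s.toList.length + 1) s.toList [] [] (by omega)
  rw [PySem.Str.splitMax?]
  rw [PySem.Chars.splitMax?, ho]
  simp only [List.isEmpty_cons, Bool.false_eq_true, if_false]
  rw [PySem.Chars.splitOnMax]
  rw [if_neg (by omega : ¬ ((1:Int) < 0))]
  simp only [Int.toNat_one, ho] at *
  rw [hr]
  simp

lemma tw_tw (cs : List Char) :
    (cs.takeWhile (fun c => !(c == '_'))).takeWhile (fun c => !(c == '-'))
      = cs.takeWhile pvNotSep := by
  induction cs with
  | nil => rfl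
  | cons c t ih =>
    by_cases h1 : c = '_'
    · simp [h1, pvNotSep]
    · by_cases h2 : c = '-'
      · simp [h2, pvNotSep]
      · simp [h1, h2, pvNotSep, ih]

lemma pyShort_eq (c : String) :
    pyShort c = String.ofList (c.toList.takeWhile pvNotSep) := by
  unfold pyShort
  rw [split1_head c '_' "_" rfl]
  rw [split1_head _ '-' "-" rfl]
  rw [← tw_tw]
  simp

-- B's first-separator index is the length of takeWhile pvNotSep
lemma firstSep_eq (cs : List Char) : pvFirstSep cs = (cs.takeWhile pvNotSep).length := by
  induction cs with
  | nil => rfl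
  | cons c t ih =>
    by_cases h : c = '-' ∨ c = '_'
    · have : pvNotSep c = false := by rcases h with h|h <;> simp [pvNotSep, h]
      simp [pvFirstSep, h, this]
    · have : pvNotSep c = true := by
        have h1 : ¬ c = '-' := fun x => h (Or.inl x)
        have h2 : ¬ c = '_' := fun x => h (Or.inr x)
        simp [pvNotSep, h1, h2]
      simp [pvFirstSep, h, this, ih]

lemma take_takeWhile {α} (p : α → Bool) (cs : List α) :
    cs.take ((cs.takeWhile p).length) = cs.takeWhile p := by
  induction cs with
  | nil => rfl
  | cons c t ih =>
    by_cases h : p c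
    · simp [List.takeWhile_cons, h, ih]
    · simp [List.takeWhile_cons, h]

lemma map_takeWhile_sep (cs : List Char) (o w : Char)
    (how : (o = '-' ∨ o = '_') ∧ (w = '-' ∨ w = '_')) :
    ((cs.map (fun c => if c = o then w else c)).takeWhile pvNotSep) = cs.takeWhile pvNotSep := by
  induction cs with
  | nil => rfl
  | cons c t ih =>
    by_cases hc : c = o
    · have h1 : pvNotSep w = false := by rcases how.2 with h|h <;> simp [pvNotSep, h]
      have h2 : pvNotSep c = false := by rcases how.1 with h|h <;> simp [pvNotSep, hc, h]
      have h3 : pvNotSep o = false := hc ▸ h2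
      simp [hc, h1, h3]
    · by_cases hs : pvNotSep c
      · simp [hc, hs, ih]
      · simp [hc, hs]

lemma mem_map_new (cs : List Char) (o w : Char) (h : o ∈ cs) :
    w ∈ cs.map (fun c => if c = o then w else c) :=
  List.mem_map.mpr ⟨o, h, by simp⟩

lemma not_mem_map_old (cs : List Char) (o w : Char) (hw : w ≠ o) :
    o ∉ cs.map (fun c => if c = o then w else c) := by
  intro h
  obtain ⟨c, _, hc⟩ := List.mem_map.mp h
  by_cases h' : c = o
  · rw [if_pos h'] at hc; exact hw hc
  · rw [if_neg h'] at hc; exact h' hc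

lemma map_id_of_not_mem (cs : List Char) (o w : Char) (h : o ∉ cs) :
    cs.map (fun c => if c = o then w else c) = cs := by
  induction cs with
  | nil => rfl
  | cons c t ih =>
    have hc : ¬ c = o := fun he => h (he ▸ List.mem_cons_self)
    simp only [List.map_cons, if_neg hc]
    rw [ih (fun hm => h (List.mem_cons_of_mem _ hm))]

lemma not_sep_mem_takeWhile (cs : List Char) (o : Char) (ho : pvNotSep o = false) :
    o ∉ cs.takeWhile pvNotSep := by
  intro h
  have := List.mem_takeWhile_imp h
  rw [ho] at this; exact Bool.false_ne_true this

lemma tw_lt {α} (p : α → Bool) (cs : List α) (x : α) (hx : x ∈ cs)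
    (hnx : x ∉ cs.takeWhile p) : (cs.takeWhile p).length < cs.length := by
  rcases Nat.lt_or_ge (cs.takeWhile p).length cs.length with h | h
  · exact h
  · exfalso
    have hle := (List.takeWhile_prefix (p := p) (l := cs)).length_le
    have heq : (cs.takeWhile p).length = cs.length := le_antisymm hle h
    have : cs.takeWhile p = cs := by
      have := take_takeWhile p cs
      rw [heq, List.take_length] at this
      exact this.symm
    exact hnx (by rw [this]; exact hx)

lemma nonEmpty_of_toList_ne (s : String) (h : s.toList ≠ []) : pvNonEmpty s = true := by
  have : ¬ s = "" := fun he => h (by simp [he])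
  simp [pvNonEmpty, this]

lemma ne_of_mem_not_mem {x : Char} {a b : String} (ha : x ∈ a.toList)
    (hb : x ∉ b.toList) : a ≠ b := fun h => hb (h ▸ ha)

lemma isIn_iff (o : Char) (os : String) (ho : os.toList = [o]) (n : String) :
    PySem.Str.isIn os n = true ↔ o ∈ n.toList := by
  rw [PySem.Str.isIn_iff_infix, ho, List.singleton_infix_iff]

lemma pv_core (n : String) (hlen : ¬ PySem.Str.len n = 0) :
    PySem.Set.ofList (([n, PySem.Str.replace n "-" "_", PySem.Str.replace n "_" "-"]
        ++ [n, PySem.Str.replace n "-" "_", PySem.Str.replace n "_" "-"].map pyShort).filter pvNonEmpty)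
      = (let out1 := [n]
         let out2 := if PySem.Str.isIn "-" n then out1 ++ [PySem.Str.replace n "-" "_"] else out1
         let out3 := if PySem.Str.isIn "_" n then out2 ++ [PySem.Str.replace n "_" "-"] else out2
         let i := pvFirstSep n.toList
         if 0 < i ∧ i < PySem.Str.len n then out3 ++ [PySem.Str.slice n none (some (i : Int))] else out3) := by
  dsimp only
  set u := PySem.Str.replace n "-" "_" with hu_def
  set d := PySem.Str.replace n "_" "-" with hd_def
  have hne : n.toList ≠ [] := by
    intro h
    apply hlen
    simp [show n = "" from by simpa using congrArg String.ofList h]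
  have hul : u.toList = n.toList.map (fun c => if c = '-' then '_' else c) := by
    rw [hu_def]
    simp only [PySem.Str.toList_replace]
    exact replace_single n.toList '-' '_'
  have hdl : d.toList = n.toList.map (fun c => if c = '_' then '-' else c) := by
    rw [hd_def]
    simp only [PySem.Str.toList_replace]
    exact replace_single n.toList '_' '-'
  set t := n.toList.takeWhile pvNotSep with ht_def
  set s' := String.ofList t with hs_def
  have hs'l : s'.toList = t := by simp [hs_def]
  have hshort_n : pyShort n = s' := by rw [pyShort_eq]
  have hshort_u : pyShort u = s' := by
    rw [pyShort_eq, hul, map_takeWhile_sep _ _ _ ⟨Or.inl rfl, Or.inr rfl⟩]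
  have hshort_d : pyShort d = s' := by
    rw [pyShort_eq, hdl, map_takeWhile_sep _ _ _ ⟨Or.inr rfl, Or.inl rfl⟩]
  have hmap : [n, u, d].map pyShort = [s', s', s'] := by
    simp [hshort_n, hshort_u, hshort_d]
  rw [hmap]
  have hnn : pvNonEmpty n = true := nonEmpty_of_toList_ne n hne
  have hfs : pvFirstSep n.toList = t.length := firstSep_eq n.toList
  have hlen_n : PySem.Str.len n = n.toList.length := by simp
  have hslice : PySem.Str.slice n none (some ((t.length : Nat) : Int)) = s' := by
    apply String.toList_inj.mp
    rw [hs'l]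
    simp only [PySem.Str.toList_slice, PySem.Chars.slice_eq_listSlice,
      PySem.List.slice_to_natCast]
    rw [ht_def]
    exact take_takeWhile _ _
  by_cases hd : '-' ∈ n.toList
  · have hiT : PySem.Str.isIn "-" n = true := (isIn_iff '-' "-" rfl n).mpr hd
    have hUu : '_' ∈ u.toList := hul ▸ mem_map_new n.toList '-' '_' hd
    have hDu : '-' ∉ u.toList := hul ▸ not_mem_map_old n.toList '-' '_' (by decide)
    have hun : u ≠ n := ne_of_mem_not_mem (x := '-') hd hDu |>.symm
    have hnu : pvNonEmpty u = true :=
      nonEmpty_of_toList_ne u (fun h => by rw [h] at hUu; exact absurd hUu (by simp))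
    have hst : '-' ∉ t := not_sep_mem_takeWhile n.toList '-' (by decide)
    by_cases hu : '_' ∈ n.toList
    · -- both separators occur
      have hiU : PySem.Str.isIn "_" n = true := (isIn_iff '_' "_" rfl n).mpr hu
      have hDd : '-' ∈ d.toList := hdl ▸ mem_map_new n.toList '_' '-' hu
      have hUd : '_' ∉ d.toList := hdl ▸ not_mem_map_old n.toList '_' '-' (by decide)
      have hdn : d ≠ n := ne_of_mem_not_mem (x := '_') hu hUd |>.symm
      have hdu : d ≠ u := ne_of_mem_not_mem (x := '_') hUu hUd |>.symm
      have hnd : pvNonEmpty d = true :=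
        nonEmpty_of_toList_ne d (fun h => by rw [h] at hDd; exact absurd hDd (by simp))
      rw [if_pos hiT, if_pos hiU]
      by_cases ht0 : t = []
      · have hs0 : s' = "" := by rw [hs_def, ht0]
        have hpe : pvNonEmpty s' = false := by rw [hs0]; decide
        have hcond : ¬ (0 < pvFirstSep n.toList ∧ pvFirstSep n.toList < PySem.Str.len n) := by
          simp [hfs, ht0]
        rw [if_neg hcond]
        simp [List.filter_cons, PySem.Set.ofList, PySem.Set.add, PySem.Set.contains, hnn, hnu, hnd, hpe, hun, hdn, hdu]
      · have hsne : pvNonEmpty s' = true := nonEmpty_of_toList_ne s' (hs'l ▸ ht0)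
        have hsn : s' ≠ n := (ne_of_mem_not_mem (x := '-') hd (hs'l ▸ hst)).symm
        have hsu : s' ≠ u := (ne_of_mem_not_mem (x := '_') hUu
          (hs'l ▸ (not_sep_mem_takeWhile n.toList '_' (by decide)))).symm
        have hsd : s' ≠ d := (ne_of_mem_not_mem (x := '-') hDd (hs'l ▸ hst)).symm
        have hcond : (0 < pvFirstSep n.toList ∧ pvFirstSep n.toList < PySem.Str.len n) := by
          rw [hfs, hlen_n]
          exact ⟨List.length_pos_iff.mpr ht0, by exact_mod_cast tw_lt pvNotSep n.toList '-' hd hst⟩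
        rw [if_pos hcond, hfs, hslice]
        simp [List.filter_cons, PySem.Set.ofList, PySem.Set.add, PySem.Set.contains, hnn, hnu, hnd, hsne, PySem.Set.add, PySem.Set.contains, hun, hdn, hdu, hsn, hsu, hsd]
    · -- only '-'
      have hiU : ¬ (PySem.Str.isIn "_" n = true) := fun h => hu ((isIn_iff '_' "_" rfl n).mp h)
      have hdeq : d = n := by
        apply String.toList_inj.mp
        rw [hdl, map_id_of_not_mem n.toList '_' '-' hu]
      rw [if_pos hiT, if_neg hiU]
      by_cases ht0 : t = []
      · have hs0 : s' = "" := by rw [hs_def, ht0]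
        have hpe : pvNonEmpty s' = false := by rw [hs0]; decide
        have hcond : ¬ (0 < pvFirstSep n.toList ∧ pvFirstSep n.toList < PySem.Str.len n) := by
          simp [hfs, ht0]
        rw [if_neg hcond, hdeq]
        simp [List.filter_cons, PySem.Set.ofList, PySem.Set.add, PySem.Set.contains, hnn, hnu, hpe, PySem.Set.add, PySem.Set.contains, hun]
      · have hsne : pvNonEmpty s' = true := nonEmpty_of_toList_ne s' (hs'l ▸ ht0)
        have hsn : s' ≠ n := (ne_of_mem_not_mem (x := '-') hd (hs'l ▸ hst)).symm
        have hsu : s' ≠ u := (ne_of_mem_not_mem (x := '_') hUu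
          (hs'l ▸ (not_sep_mem_takeWhile n.toList '_' (by decide)))).symm
        have hcond : (0 < pvFirstSep n.toList ∧ pvFirstSep n.toList < PySem.Str.len n) := by
          rw [hfs, hlen_n]
          exact ⟨List.length_pos_iff.mpr ht0, by exact_mod_cast tw_lt pvNotSep n.toList '-' hd hst⟩
        rw [if_pos hcond, hfs, hslice, hdeq]
        simp [List.filter_cons, PySem.Set.ofList, PySem.Set.add, PySem.Set.contains, hnn, hnu, hsne, PySem.Set.add, PySem.Set.contains, hun, hsn, hsu]
  · have hiT : ¬ (PySem.Str.isIn "-" n = true) := fun h => hd ((isIn_iff '-' "-" rfl n).mp h)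
    have hueq : u = n := by
      apply String.toList_inj.mp
      rw [hul, map_id_of_not_mem n.toList '-' '_' hd]
    by_cases hu : '_' ∈ n.toList
    · -- only '_'
      have hiU : PySem.Str.isIn "_" n = true := (isIn_iff '_' "_" rfl n).mpr hu
      have hDd : '-' ∈ d.toList := hdl ▸ mem_map_new n.toList '_' '-' hu
      have hUd : '_' ∉ d.toList := hdl ▸ not_mem_map_old n.toList '_' '-' (by decide)
      have hdn : d ≠ n := ne_of_mem_not_mem (x := '_') hu hUd |>.symm
      have hnd : pvNonEmpty d = true :=
        nonEmpty_of_toList_ne d (fun h => by rw [h] at hDd; exact absurd hDd (by simp))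
      have hst : '_' ∉ t := not_sep_mem_takeWhile n.toList '_' (by decide)
      rw [if_neg hiT, if_pos hiU]
      by_cases ht0 : t = []
      · have hs0 : s' = "" := by rw [hs_def, ht0]
        have hpe : pvNonEmpty s' = false := by rw [hs0]; decide
        have hcond : ¬ (0 < pvFirstSep n.toList ∧ pvFirstSep n.toList < PySem.Str.len n) := by
          simp [hfs, ht0]
        rw [if_neg hcond, hueq]
        simp [List.filter_cons, PySem.Set.ofList, PySem.Set.add, PySem.Set.contains, hnn, hnd, hpe, PySem.Set.add, PySem.Set.contains, hdn]
      · have hsne : pvNonEmpty s' = true := nonEmpty_of_toList_ne s' (hs'l ▸ ht0)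
        have hsn : s' ≠ n := (ne_of_mem_not_mem (x := '_') hu (hs'l ▸ hst)).symm
        have hsd : s' ≠ d := (ne_of_mem_not_mem (x := '-') hDd
          (hs'l ▸ (not_sep_mem_takeWhile n.toList '-' (by decide)))).symm
        have hcond : (0 < pvFirstSep n.toList ∧ pvFirstSep n.toList < PySem.Str.len n) := by
          rw [hfs, hlen_n]
          exact ⟨List.length_pos_iff.mpr ht0, by exact_mod_cast tw_lt pvNotSep n.toList '_' hu hst⟩
        rw [if_pos hcond, hfs, hslice, hueq]
        simp [List.filter_cons, PySem.Set.ofList, PySem.Set.add, PySem.Set.contains, hnn, hnd, hsne, PySem.Set.add, PySem.Set.contains, hdn, hsn, hsd]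
    · -- no separator at all
      have hiU : ¬ (PySem.Str.isIn "_" n = true) := fun h => hu ((isIn_iff '_' "_" rfl n).mp h)
      have hdeq : d = n := by
        apply String.toList_inj.mp
        rw [hdl, map_id_of_not_mem n.toList '_' '-' hu]
      have htn : t = n.toList := by
        rw [ht_def]
        apply List.takeWhile_eq_self_iff.mpr
        intro x hx
        have h1 : ¬ x = '-' := fun he => hd (he ▸ hx)
        have h2 : ¬ x = '_' := fun he => hu (he ▸ hx)
        simp [pvNotSep, h1, h2]
      have hseq : s' = n := by
        apply String.toList_inj.mp
        rw [hs'l, htn]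
      have hcond : ¬ (0 < pvFirstSep n.toList ∧ pvFirstSep n.toList < PySem.Str.len n) := by
        rw [hfs, hlen_n, htn]
        simp
      rw [if_neg hiT, if_neg hiU, if_neg hcond, hueq, hdeq, hseq]
      simp [List.filter_cons, PySem.Set.ofList, PySem.Set.add, PySem.Set.contains, hnn, PySem.Set.add, PySem.Set.contains]

-- ===== VERDICT (by name: the statement is the Claim_ definition above) =====
theorem translation_candidates_py_spec : Claim_equal_translation_candidates_py := by
  intro language _
  unfold Spec_translation_candidates_py translation_candidates_py translation_candidates_py_alt
  dsimp only
  by_cases hlen : PySem.Str.len (PySem.Str.strip language) = 0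
  · rw [if_pos hlen, if_pos hlen]
  · rw [if_neg hlen, if_neg hlen]
    rw [foldl_guard_id, foldl_guard pyShort, PySem.Set.update_nil_left,
      update_map_ofList, filt_map_filt, ← PySem.Set.ofList_append, ← List.filter_append]
    exact pv_core (PySem.Str.strip language) hlen
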